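-- pv_equiv track=rewrite | github.com/Mickey5661/AISD | SecondSemester/Lab1/Task5.py | max_unique_sum
-- ===== SOURCE A (Python) =====
-- def max_unique_sum(n):
--     result = []
--     current = 1
--     while n > 0:
--         if n - current > current:
--             result.append(current)
--             n -= current
--             current += 1
--         else:
--             result.append(n)
--             break
--     return result
-- ===== SOURCE B (Python) =====
-- def max_unique_sum(n):
--     # Binary search for t = the largest t >= 0 with t*t + 3*t < 2*n,
--     # then build the answer [1..t] + [n - t*(t+1)//2] directly.
--     if n <= 0:
--         return []
--     lo, hi = 0, n
--     while lo < hi: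
--         mid = (lo + hi + 1) // 2
--         if mid * mid + 3 * mid < 2 * n:
--             lo = mid
--         else:
--             hi = mid - 1
--     t = lo
--     return list(range(1, t + 1)) + [n - t * (t + 1) // 2]
-- ===== Notes on version B (the rewrite author's own statement) =====
-- stated objective: alternative
-- what changed: Replaces A's step-by-step greedy simulation (repeatedly subtracting the current addend from n) by a binary search for the number t of full addends (largest t with t*t+3*t < 2*n), then building [1..t] + [n - t*(t+1)//2] in one stroke.
import Mathlib
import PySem

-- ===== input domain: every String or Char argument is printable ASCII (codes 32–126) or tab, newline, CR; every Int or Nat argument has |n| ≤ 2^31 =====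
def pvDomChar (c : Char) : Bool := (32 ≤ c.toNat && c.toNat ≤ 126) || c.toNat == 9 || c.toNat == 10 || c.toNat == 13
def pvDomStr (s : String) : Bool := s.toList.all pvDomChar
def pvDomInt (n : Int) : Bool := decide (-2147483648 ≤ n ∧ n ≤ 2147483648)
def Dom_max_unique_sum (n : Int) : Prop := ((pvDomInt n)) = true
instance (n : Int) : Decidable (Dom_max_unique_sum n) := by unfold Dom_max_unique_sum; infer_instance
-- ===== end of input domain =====

-- B replaces A's greedy simulation by a binary search for the count of full addends plus a direct list construction (alternative algorithm, same result).

-- ===== PORT A =====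
-- the while loop of A; fuel = n.toNat + 1 always suffices since n decreases by current ≥ 1 each iteration
def pvLoopA (fuel : Nat) (n current : Int) (result : List Int) : List Int :=
  match fuel with
  | 0 => result
  | fuel + 1 =>
    if n > 0 then
      if n - current > current then
        pvLoopA fuel (n - current) (current + 1) (result ++ [current])
      else
        result ++ [n]
    else result

def max_unique_sum (n : Int) : List Int := pvLoopA (n.toNat + 1) n 1 []

-- ===== PORT B =====
-- the binary-search while loop of B; fuel = n.toNat + 1 suffices since hi - lo shrinks each iteration
def pvLoopB (fuel : Nat) (n lo hi : Int) : Int :=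
  match fuel with
  | 0 => lo
  | fuel + 1 =>
    if lo < hi then
      let mid := PySem.Int.floordiv (lo + hi + 1) 2
      if mid * mid + 3 * mid < 2 * n then pvLoopB fuel n mid hi
      else pvLoopB fuel n lo (mid - 1)
    else lo

def max_unique_sum_alt (n : Int) : List Int :=
  if n ≤ 0 then []
  else
    let t := pvLoopB (n.toNat + 1) n 0 n
    PySem.List.pyRange 1 (t + 1) 1 ++ [n - PySem.Int.floordiv (t * (t + 1)) 2]

-- ===== PRECONDITION & SPEC =====
def Spec_max_unique_sum (n : Int) (out : List Int) : Prop := out = max_unique_sum_alt n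
instance (n : Int) (out : List Int) : Decidable (Spec_max_unique_sum n out) := by unfold Spec_max_unique_sum; infer_instance

-- ===== CLAIM (what is proved, stated in full; the proofs are below) =====
def Claim_equal_max_unique_sum : Prop := ∀ (n : Int), Dom_max_unique_sum n → Spec_max_unique_sum n (max_unique_sum n)

-- ===== LEMMAS AND PROOFS =====

-- abstract version of A's loop, recursing on the remaining amount
def pvG (m c : Int) : List Int :=
  if h : 0 < c ∧ 2 * c < m then c :: pvG (m - c) (c + 1) else [m]
termination_by m.toNat
decreasing_by omega

-- A's fueled loop computes pvG
theorem pvLoopA_eq_pvG : ∀ (fuel : Nat) (m c : Int) (res : List Int),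
    1 ≤ c → 0 < m → m.toNat ≤ fuel → pvLoopA fuel m c res = res ++ pvG m c := by
  intro fuel
  induction fuel with
  | zero => intro m c res hc hm hf; omega
  | succ fuel ih =>
    intro m c res hc hm hf
    rw [pvLoopA, pvG]
    rw [if_pos hm]
    by_cases h : 0 < c ∧ 2 * c < m
    · rw [if_pos (by omega), dif_pos h, ih (m - c) (c + 1) (res ++ [c]) (by omega) (by omega) (by omega)]
      simp
    · rw [if_neg (by omega), dif_neg h]

-- B's binary search finds the unique boundary t
theorem pvLoopB_eq : ∀ (fuel : Nat) (n lo hi t : Int),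
    0 ≤ lo → lo ≤ t → t ≤ hi →
    t * t + 3 * t < 2 * n → 2 * n ≤ (t + 1) * (t + 1) + 3 * (t + 1) →
    (hi - lo).toNat ≤ fuel → pvLoopB fuel n lo hi = t := by
  intro fuel
  induction fuel with
  | zero => intro n lo hi t h0 h1 h2 h3 h4 hf; unfold pvLoopB; omega
  | succ fuel ih =>
    intro n lo hi t h0 h1 h2 h3 h4 hf
    rw [pvLoopB]
    by_cases hlt : lo < hi
    · rw [if_pos hlt]
      have hmid : lo < PySem.Int.floordiv (lo + hi + 1) 2 ∧ PySem.Int.floordiv (lo + hi + 1) 2 ≤ hi := by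
        rw [PySem.Int.floordiv_eq_ediv_of_pos (by omega)]
        omega
      set mid := PySem.Int.floordiv (lo + hi + 1) 2 with hm
      by_cases hg : mid * mid + 3 * mid < 2 * n
      · rw [if_pos hg]
        have hmt : mid ≤ t := by
          by_contra hcon
          have h5 : t + 1 ≤ mid := by omega
          nlinarith
        exact ih n mid hi t (by omega) hmt h2 h3 h4 (by omega)
      · rw [if_neg hg]
        have hmt : t ≤ mid - 1 := by
          by_contra hcon
          have h5 : mid ≤ t := by omega
          have : mid * mid + 3 * mid ≤ t * t + 3 * t := by nlinarith
          omega
        exact ih n lo (mid - 1) t h0 h1 hmt h3 h4 (by omega)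
    · rw [if_neg hlt]; omega

-- closed form of pvG: t is the number of continue-steps taken from state (m, c)
theorem pvG_closed : ∀ (m c t : Int), 0 < c → 0 < m → 0 ≤ t →
    (t = 0 ∨ 2 * m > 2 * (t - 1) * c + (t - 1) * (t - 1) + 3 * (t - 1) + 4 * c) →
    2 * m ≤ 2 * t * c + t * t + 3 * t + 4 * c →
    pvG m c = PySem.List.pyRange c (c + t) 1 ++ [m - t * c - PySem.Int.floordiv (t * (t - 1)) 2] := by
  intro m
  induction hm : m.toNat using Nat.strong_induction_on generalizing m with
  | _ k ih =>
  intro c t hc hm0 ht H0 H1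
  rcases eq_or_lt_of_le ht with h | htpos
  · -- t = 0 : loop exits immediately
    have ht0 : t = 0 := h.symm
    subst ht0
    rw [pvG, dif_neg (by omega)]
    simp [PySem.Int.floordiv]
  · -- t ≥ 1 : one continue-step, then induction
    have hQ : 2 * m > 2 * (t - 1) * c + (t - 1) * (t - 1) + 3 * (t - 1) + 4 * c := by
      rcases H0 with h0 | h0
      · omega
      · exact h0
    have hstep : 2 * c < m := by nlinarith
    rw [pvG, dif_pos ⟨hc, hstep⟩]
    have hrec := ih (m - c).toNat (by omega) (m - c) rfl (c + 1) (t - 1)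
      (by omega) (by omega) (by omega)
      (by
        by_cases h1 : t - 1 = 0
        · exact Or.inl h1
        · right; nlinarith [hQ])
      (by nlinarith [H1])
    have h2 : c + 1 + (t - 1) = c + t := by omega
    rw [h2] at hrec
    have hr : PySem.List.pyRange c (c + t) 1 = c :: PySem.List.pyRange (c + 1) (c + t) 1 :=
      PySem.List.pyRange_one_cons (by omega)
    have hd : PySem.Int.floordiv (t * (t - 1)) 2 =
        PySem.Int.floordiv ((t - 1) * (t - 1 - 1)) 2 + (t - 1) := by
      have he : t * (t - 1) = (t - 1) * (t - 1 - 1) + (t - 1) * 2 := by ring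
      rw [he, PySem.Int.floordiv_eq_ediv_of_pos (by omega),
          PySem.Int.floordiv_eq_ediv_of_pos (by omega), Int.add_mul_ediv_right _ _ (by omega)]
    rw [hrec, hr, List.cons_append]
    congr 1
    congr 1
    rw [hd]
    ring_nf

theorem fdiv_shift (t : Int) : PySem.Int.floordiv (t * (t + 1)) 2 = PySem.Int.floordiv (t * (t - 1)) 2 + t := by
  have he : t * (t + 1) = t * (t - 1) + t * 2 := by ring
  rw [he, PySem.Int.floordiv_eq_ediv_of_pos (by omega),
      PySem.Int.floordiv_eq_ediv_of_pos (by omega), Int.add_mul_ediv_right _ _ (by omega)]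

theorem max_unique_sum_eq (n : Int) : max_unique_sum n = max_unique_sum_alt n := by
  by_cases hn : n ≤ 0
  · unfold max_unique_sum max_unique_sum_alt pvLoopA
    rw [if_pos hn]
    simp [show ¬ n > 0 by omega]
  · replace hn : 0 < n := by omega
    -- the boundary count t : smallest k with 2n ≤ (k+1)^2 + 3(k+1)
    have hP : ∃ k : Nat, 2 * n ≤ ((k : Int) + 1) * ((k : Int) + 1) + 3 * ((k : Int) + 1) := by
      refine ⟨(2 * n).toNat, ?_⟩
      have hc : ((2 * n).toNat : Int) = 2 * n := by omega
      nlinarith [hc]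
    set k := Nat.find hP with hkdef
    set t : Int := (k : Int) with htdef
    have ht0 : 0 ≤ t := by positivity
    have ht1 : 2 * n ≤ (t + 1) * (t + 1) + 3 * (t + 1) := Nat.find_spec hP
    have ht2 : t * t + 3 * t < 2 * n := by
      by_cases hk0 : k = 0
      · rw [htdef, hk0]; push_cast; omega
      · have hmin := Nat.find_min hP (m := k - 1) (by omega)
        have hcast : ((k - 1 : Nat) : Int) = t - 1 := by
          rw [htdef]; omega
        rw [hcast] at hmin
        have : ¬ (2 * n ≤ (t - 1 + 1) * (t - 1 + 1) + 3 * (t - 1 + 1)) := hmin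
        nlinarith [this]
    have htn : t ≤ n := by
      by_contra hcon
      replace hcon : n < t := by omega
      nlinarith
    -- A side
    have hA : max_unique_sum n = pvG n 1 := by
      unfold max_unique_sum
      rw [pvLoopA_eq_pvG (n.toNat + 1) n 1 [] (by omega) (by omega) (by omega)]
      simp
    have hAc : pvG n 1 = PySem.List.pyRange 1 (1 + t) 1 ++
        [n - t * 1 - PySem.Int.floordiv (t * (t - 1)) 2] := by
      apply pvG_closed n 1 t (by omega) (by omega) ht0
      · right; nlinarith
      · nlinarith
    -- B side
    have hB : pvLoopB (n.toNat + 1) n 0 n = t := by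
      apply pvLoopB_eq (n.toNat + 1) n 0 n t (by omega) ht0 htn ht2 ht1 (by omega)
    unfold max_unique_sum_alt
    rw [if_neg (by omega)]
    simp only [hB]
    rw [hA, hAc]
    have h12 : (1 : Int) + t = t + 1 := by omega
    rw [h12, fdiv_shift]
    congr 1
    congr 1
    omega

-- ===== VERDICT (by name: the statement is the Claim_ definition above) =====
theorem max_unique_sum_spec : Claim_equal_max_unique_sum := by
  intro n _
  unfold Spec_max_unique_sum
  exact max_unique_sum_eq n
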